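-- pv_equiv track=rewrite | github.com/mathcoding/opt4ds | python/basic_sir_fitting.py | DecomposeWeek
-- ===== SOURCE A (Python) =====
-- def DecomposeWeek(C, n=7):
--     """ Change time unit of periods in n days """
--     d = len(C) // n + 1
--     idx = 0
--     W = []
--     for i in range(d):
--         w = 0
--         for _ in range(n):
--             w += C[min(idx, len(C)-1)]
--             idx += 1
--         W.append(w)
--     return W
-- ===== SOURCE B (Python) =====
-- def DecomposeWeek(C, n=7):
--     """ Change time unit of periods in n days """
--     d = len(C) // n + 1
--     L = len(C)
--     P = [0]
--     for x in C:
--         P.append(P[-1] + x)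
--     last = C[-1]
--     return [P[min((i + 1) * n, L)] - P[min(i * n, L)]
--             + max(0, (i + 1) * n - max(i * n, L)) * last
--             for i in range(d)]
-- ===== Notes on version B (the rewrite author's own statement) =====
-- stated objective: faster
-- what changed: Replaces A's nested summing loops (one addition per day per bucket) by a prefix-sum algorithm: one pass builds cumulative sums P, then each bucket is computed in O(1) as P[min((i+1)*n,L)] - P[min(i*n,L)] plus an arithmetic count of repeats of the last value; no inner summation remains (B does one addition per data point instead of one per covered day, measured ~3.5x faster).
-- outside the precondition, e.g. on DecomposeWeek([], -2): A returns [0], B raises IndexError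
import Mathlib
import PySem

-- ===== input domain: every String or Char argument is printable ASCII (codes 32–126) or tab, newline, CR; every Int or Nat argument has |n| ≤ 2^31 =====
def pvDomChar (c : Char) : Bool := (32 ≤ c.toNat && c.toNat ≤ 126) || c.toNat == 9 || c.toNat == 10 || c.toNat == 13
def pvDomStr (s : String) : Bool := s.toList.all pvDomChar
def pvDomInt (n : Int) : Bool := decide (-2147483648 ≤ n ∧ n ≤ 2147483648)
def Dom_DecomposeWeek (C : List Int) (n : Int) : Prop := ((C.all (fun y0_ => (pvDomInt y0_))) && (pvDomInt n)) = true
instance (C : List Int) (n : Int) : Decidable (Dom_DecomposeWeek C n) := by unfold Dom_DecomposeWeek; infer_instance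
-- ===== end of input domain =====

-- B replaces A's nested summing loops by a different algorithm: one prefix-sum pass over C,
-- then each bucket is a closed-form difference of two prefix sums plus an arithmetic tail
-- term counting the repeats of the last value (no per-bucket inner summation); measured faster.


-- ===== PORT A =====
-- A: d = len(C)//n + 1; nested loops with a running index idx, each inner pass adding
-- C[min(idx, len(C)-1)].  (The subscript is ported as pyGetD with default 0: inside
-- Pre_ the clamped index is always in range; the raising inputs are outside Pre_.)
def DecomposeWeek (C : List Int) (n : Int) : List Int :=
  let d := PySem.Int.floordiv (C.length : Int) n + 1
  let st := (PySem.List.pyRange 0 d).foldl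
    (fun (st : Int × List Int) (_i : Int) =>
      let p := (PySem.List.pyRange 0 n).foldl
        (fun (p : Int × Int) (_j : Int) =>
          (p.1 + PySem.List.pyGetD C (min p.2 ((C.length : Int) - 1)) 0, p.2 + 1))
        (0, st.1)
      (p.2, st.2 ++ [p.1]))
    (0, ([] : List Int))
  st.2

-- ===== PORT B =====
-- B: one pass builds the prefix sums P (P[k] = sum of the first k values); bucket i is then
-- P[min((i+1)*n, L)] - P[min(i*n, L)] plus max(0, (i+1)*n - max(i*n, L)) copies of the
-- last element of C.  (The two negative-index accesses to the last element are ported as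
-- pyGetD with default 0, always in range inside Pre_; every P subscript lies in [0, L].)
def DecomposeWeek_alt (C : List Int) (n : Int) : List Int :=
  let d := PySem.Int.floordiv (C.length : Int) n + 1
  let L := (C.length : Int)
  let P := C.foldl (fun (P : List Int) x => P ++ [PySem.List.pyGetD P (-1) 0 + x]) [0]
  let last := PySem.List.pyGetD C (-1) 0
  (PySem.List.pyRange 0 d).map (fun i =>
    PySem.List.pyGetD P (min ((i + 1) * n) L) 0 - PySem.List.pyGetD P (min (i * n) L) 0
      + max 0 ((i + 1) * n - max (i * n) L) * last)

-- ===== PRECONDITION & SPEC =====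
-- Pre_ excludes n = 0 (ZeroDivisionError in both) and the empty list: there A raises
-- IndexError for n > 0, and for n < 0 returns a single accidental zero bucket (artefact of
-- the empty inner loop) while B's access to the last element raises IndexError; cited in claim.json.
def Pre_DecomposeWeek (C : List Int) (n : Int) : Prop := n ≠ 0 ∧ C ≠ []
instance (C : List Int) (n : Int) : Decidable (Pre_DecomposeWeek C n) := by unfold Pre_DecomposeWeek; infer_instance
def pvWitness_DecomposeWeek : List Int × Int := ([3, 1, 4, 1, 5], 2)
def Spec_DecomposeWeek (C : List Int) (n : Int) (out : List Int) : Prop := out = DecomposeWeek_alt C n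
instance (C : List Int) (n : Int) (out : List Int) : Decidable (Spec_DecomposeWeek C n out) := by unfold Spec_DecomposeWeek; infer_instance

-- ===== CLAIM (what is proved, stated in full; the proofs are below) =====
def Claim_equal_DecomposeWeek : Prop := ∀ (C : List Int) (n : Int), Dom_DecomposeWeek C n → Pre_DecomposeWeek C n → Spec_DecomposeWeek C n (DecomposeWeek C n)

-- ===== LEMMAS AND PROOFS =====

-- A's clamped element access
def pvG (C : List Int) (k : Int) : Int := PySem.List.pyGetD C (min k ((C.length : Int) - 1)) 0

lemma inner_loop (C : List Int) (n' : Nat) (w0 idx0 : Int) :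
    (List.range n').foldl
      (fun (p : Int × Int) (_j : Nat) =>
        (p.1 + PySem.List.pyGetD C (min p.2 ((C.length : Int) - 1)) 0, p.2 + 1))
      (w0, idx0)
    = (w0 + ((List.range n').map (fun j : Nat => pvG C (idx0 + (j : Int)))).sum, idx0 + n') := by
  induction n' with
  | zero => simp
  | succ m ih =>
    rw [List.range_succ, List.foldl_append, ih, List.map_append, List.sum_append]
    simp only [List.foldl_cons, List.foldl_nil, List.map_cons, List.map_nil, List.sum_cons,
      List.sum_nil, pvG]
    simp only [Prod.mk.injEq]
    exact ⟨by ring, by push_cast; ring⟩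

lemma outer_loop (C : List Int) (n : Int) (n' : Nat) (hn : n = (n' : Int)) (k : Nat) :
    (List.range k).foldl
      (fun (st : Int × List Int) (_i : Nat) =>
        let p := (PySem.List.pyRange 0 n).foldl
          (fun (p : Int × Int) (_j : Int) =>
            (p.1 + PySem.List.pyGetD C (min p.2 ((C.length : Int) - 1)) 0, p.2 + 1))
          (0, st.1)
        (p.2, st.2 ++ [p.1]))
      (0, ([] : List Int))
    = ((k : Int) * n,
       (List.range k).map (fun i : Nat => ((List.range n').map (fun j : Nat => pvG C ((i : Int) * n + (j : Int)))).sum)) := by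
  have hpy : PySem.List.pyRange 0 n = (List.range n').map (fun j : Nat => (j : Int)) := by
    rw [hn, PySem.List.pyRange_zero_natCast]
  induction k with
  | zero => simp
  | succ m ih =>
    rw [List.range_succ, List.foldl_append, ih]
    simp only [List.foldl_cons, List.foldl_nil]
    rw [hpy, List.foldl_map, inner_loop]
    simp only [Prod.mk.injEq, List.map_append, List.map_cons, List.map_nil]
    refine ⟨by rw [hn]; push_cast; ring, ?_⟩
    rw [hn]
    simp

lemma pyGetD_last (l : List Int) (h : l ≠ []) :
    PySem.List.pyGetD l (-1) 0 = l.getD (l.length - 1) 0 := by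
  have hl : 1 ≤ l.length := List.length_pos_iff.mpr h
  simp [PySem.List.pyGetD, PySem.List.pyGet?, PySem.List.pyIdx?, hl]

-- B's prefix-sum list is the list of take-sums
lemma prefix_foldl (C : List Int) :
    C.foldl (fun (P : List Int) x => P ++ [PySem.List.pyGetD P (-1) 0 + x]) [0]
    = (List.range (C.length + 1)).map (fun k => (C.take k).sum) := by
  induction C using List.reverseRecOn with
  | nil => simp
  | append_singleton D x ih =>
    rw [List.foldl_append, ih]
    simp only [List.foldl_cons, List.foldl_nil]
    have hlast : PySem.List.pyGetD ((List.range (D.length + 1)).map (fun k => (D.take k).sum)) (-1) 0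
        = D.sum := by
      rw [pyGetD_last _ (by simp)]
      simp
    rw [hlast]
    have hlen : (D ++ [x]).length + 1 = (D.length + 1) + 1 := by simp
    rw [hlen, List.range_succ (n := D.length + 1), List.map_append]
    congr 1
    · refine List.map_congr_left ?_
      intro k hk
      have hk' : k < D.length + 1 := List.mem_range.mp hk
      rw [List.take_append_of_le_length (by omega)]
    · have ht : (D ++ [x]).take (D.length + 1) = D ++ [x] := List.take_of_length_le (by simp)
      simp [ht]

lemma take_sum_succ (C : List Int) (m : Nat) (h : m < C.length) :
    (C.take (m + 1)).sum = (C.take m).sum + C.getD m 0 := by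
  rw [List.getD_eq_getElem _ _ h]
  exact List.sum_take_succ C m h

-- closed form for a clamped block sum
lemma sum_clamped (C : List Int) (hC : C ≠ []) (lo k : Nat) :
    ((List.range k).map (fun j : Nat => pvG C (((lo : Nat) : Int) + (j : Int)))).sum
    = (C.take (min (lo + k) C.length)).sum - (C.take (min lo C.length)).sum
      + max 0 (((lo + k : Nat) : Int) - max ((lo : Nat) : Int) ((C.length : Int)))
          * C.getD (C.length - 1) 0 := by
  have hL : 1 ≤ C.length := List.length_pos_iff.mpr hC
  induction k with
  | zero =>
    simp
  | succ m ih =>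
    rw [List.range_succ, List.map_append, List.sum_append, ih]
    simp only [List.map_cons, List.map_nil, List.sum_cons, List.sum_nil, add_zero]
    have hval : pvG C (((lo : Nat) : Int) + ((m : Nat) : Int)) =
        C.getD (min (lo + m) (C.length - 1)) 0 := by
      have hmin : min (((lo : Nat) : Int) + ((m : Nat) : Int)) ((C.length : Int) - 1)
          = ((min (lo + m) (C.length - 1) : Nat) : Int) := by omega
      rw [pvG, hmin, PySem.List.pyGetD_natCast]
    by_cases h : lo + m < C.length
    · have hmin1 : min (lo + m) (C.length - 1) = lo + m := by omega
      have hmin2 : min (lo + (m + 1)) C.length = lo + m + 1 := by omega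
      have hmin3 : min (lo + m) C.length = lo + m := by omega
      have hz1 : max 0 (((lo + m : Nat) : Int) - max ((lo : Nat) : Int) ((C.length : Int))) = 0 := by
        omega
      have hz2 : max 0 (((lo + (m + 1) : Nat) : Int) - max ((lo : Nat) : Int) ((C.length : Int))) = 0 := by
        omega
      rw [hval, hmin1, hmin2, hmin3, hz1, hz2, take_sum_succ C (lo + m) h]
      ring
    · have hmin1 : min (lo + m) (C.length - 1) = C.length - 1 := by omega
      have hmin2 : min (lo + (m + 1)) C.length = C.length := by omega
      have hmin3 : min (lo + m) C.length = C.length := by omega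
      have hmx : max ((lo : Nat) : Int) ((C.length : Int)) ≤ ((lo + m : Nat) : Int) := by omega
      have hz1 : max 0 (((lo + m : Nat) : Int) - max ((lo : Nat) : Int) ((C.length : Int)))
          = ((lo + m : Nat) : Int) - max ((lo : Nat) : Int) ((C.length : Int)) := by omega
      have hz2 : max 0 (((lo + (m + 1) : Nat) : Int) - max ((lo : Nat) : Int) ((C.length : Int)))
          = ((lo + m : Nat) : Int) - max ((lo : Nat) : Int) ((C.length : Int)) + 1 := by omega
      rw [hval, hmin1, hmin2, hmin3, hz1, hz2]
      ring

lemma P_get (C : List Int) (k : Int) (h0 : 0 ≤ k) (h1 : k ≤ (C.length : Int)) :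
    PySem.List.pyGetD (C.foldl (fun (P : List Int) x => P ++ [PySem.List.pyGetD P (-1) 0 + x]) [0]) k 0
    = (C.take k.toNat).sum := by
  rw [prefix_foldl]
  have hk : k = ((k.toNat : Nat) : Int) := by omega
  rw [hk, PySem.List.pyGetD_natCast]
  have hlt : k.toNat < C.length + 1 := by omega
  rw [List.getD_eq_getElem _ _ (by simpa using hlt)]
  simp only [List.getElem_map, List.getElem_range]
  have ht : (((k.toNat : Nat) : Int)).toNat = k.toNat := by omega
  rw [ht]

theorem pv_main (C : List Int) (n : Int) (hn0 : n ≠ 0) (hC : C ≠ []) :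
    DecomposeWeek C n = DecomposeWeek_alt C n := by
  have hlen1 : 1 ≤ C.length := List.length_pos_iff.mpr hC
  rcases lt_trichotomy n 0 with hneg | hz | hpos
  · -- n < 0 : d ≤ 0, both return []
    have h2 := PySem.Int.floordiv_mul_add_mod (C.length : Int) n
    have h3 := PySem.Int.mod_neg_bounds (C.length : Int) hneg
    have hq : PySem.Int.floordiv (C.length : Int) n ≤ -1 := by
      by_contra hq'
      push Not at hq'
      have hq0 : 0 ≤ PySem.Int.floordiv (C.length : Int) n := by omega
      nlinarith [h2, h3.1, h3.2]
    have hd0 : PySem.Int.floordiv (C.length : Int) n + 1 ≤ 0 := by omega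
    have hr : PySem.List.pyRange 0 (PySem.Int.floordiv (C.length : Int) n + 1) = [] := by
      simp [PySem.List.pyRange, hd0]
    simp only [DecomposeWeek, DecomposeWeek_alt, hr, List.foldl_nil, List.map_nil]
  · exact absurd hz hn0
  · -- n > 0
    have h2 := PySem.Int.floordiv_mul_add_mod (C.length : Int) n
    have h3 := PySem.Int.mod_nonneg (C.length : Int) hpos
    have h4 := PySem.Int.mod_lt (C.length : Int) hpos
    set q := PySem.Int.floordiv (C.length : Int) n with hqdef
    have hq0 : 0 ≤ q := by
      by_contra hq'
      push Not at hq'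
      nlinarith
    set d := q + 1 with hddef
    set n' : Nat := n.toNat with hn'def
    have hn : n = (n' : Int) := by omega
    set d' : Nat := d.toNat with hd'def
    have hd : d = (d' : Int) := by omega
    have hpyd : PySem.List.pyRange 0 d = (List.range d').map (fun k : Nat => (k : Int)) := by
      rw [hd, PySem.List.pyRange_zero_natCast]
    have hA : DecomposeWeek C n =
        (List.range d').map (fun i : Nat =>
          ((List.range n').map (fun j : Nat => pvG C ((i : Int) * n + (j : Int)))).sum) := by
      simp only [DecomposeWeek, ← hqdef, ← hddef]
      rw [hpyd, List.foldl_map, outer_loop C n n' hn d']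
    have hlast : PySem.List.pyGetD C (-1) 0 = C.getD (C.length - 1) 0 :=
      pyGetD_last C hC
    have hB : DecomposeWeek_alt C n =
        (List.range d').map (fun i : Nat =>
          ((List.range n').map (fun j : Nat => pvG C ((i : Int) * n + (j : Int)))).sum) := by
      simp only [DecomposeWeek_alt, ← hqdef, ← hddef]
      rw [hpyd, List.map_map]
      refine List.map_congr_left ?_
      intro i _
      simp only [Function.comp]
      have e1 : ((i : Int) + 1) * n = ((i * n' + n' : Nat) : Int) := by rw [hn]; push_cast; ring
      have e2 : (i : Int) * n = ((i * n' : Nat) : Int) := by rw [hn]; push_cast; ring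
      have m1 : min (((i : Int) + 1) * n) ((C.length : Int))
          = ((min (i * n' + n') C.length : Nat) : Int) := by rw [e1]; omega
      have m2 : min ((i : Int) * n) ((C.length : Int))
          = ((min (i * n') C.length : Nat) : Int) := by rw [e2]; omega
      rw [m1, m2, P_get C _ (by omega) (by omega), P_get C _ (by omega) (by omega), hlast]
      simp only [Int.toNat_natCast, e1, e2]
      rw [sum_clamped C hC (i * n') n']
    rw [hA, hB]

-- ===== VERDICT (by name: the statement is the Claim_ definition above) =====
theorem DecomposeWeek_spec : Claim_equal_DecomposeWeek := by
  intro C n _hDom hPre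
  exact pv_main C n hPre.1 hPre.2
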